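-- pv_equiv track=rewrite | github.com/bimj0rk/Python | Personal/Python101/Laborator_1/Task6/task06.py | func
-- ===== SOURCE A (Python) =====
-- def func(size):
--
--     romb = ""
--
--     ################### TO DO #########################
--     size = size + (1 - size % 2)
--     spatiu = size // 2
--     t = -1
--
--     for i in range(size):
--         romb += " " * spatiu # ca sa centreze
--         romb += "@"
--         spatiu = max(0, spatiu + t)
--
--         if i < size // 2: #daca creste
--             romb += "." * 2 * i
--         else: #daca scade
--             romb += "." * 2 * (size - i - 1)
--             t = 1
--             if spatiu == 0:
--                 spatiu = 1
--         romb += "@\n"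
--     ###################################################
--
--     return romb
-- ===== SOURCE B (Python) =====
-- def func(size):
--     size = size + (1 - size % 2)
--     half = size // 2
--     return ''.join(' ' * abs(half - i) + '@' + '.' * (2 * min(i, size - 1 - i)) + '@\n' for i in range(size))
-- ===== Notes on version B (the rewrite author's own statement) =====
-- stated objective: simpler
-- what changed: Replaced A's stateful loop threading a running indent and a direction sentinel (with max/zero corrections) by a stateless join of rows, each computed directly from its index: spaces from the absolute offset to the middle row, dots from the distance to the nearer tip.
import Mathlib
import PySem

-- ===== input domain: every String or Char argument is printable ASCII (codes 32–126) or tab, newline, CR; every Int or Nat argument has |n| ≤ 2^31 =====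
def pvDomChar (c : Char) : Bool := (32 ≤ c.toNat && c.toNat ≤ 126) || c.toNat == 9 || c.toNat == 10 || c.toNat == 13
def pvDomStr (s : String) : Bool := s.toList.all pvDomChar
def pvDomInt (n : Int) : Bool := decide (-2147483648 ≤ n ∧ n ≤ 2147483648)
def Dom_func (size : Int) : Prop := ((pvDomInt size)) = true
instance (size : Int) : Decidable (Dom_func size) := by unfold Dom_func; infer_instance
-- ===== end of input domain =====

-- B replaces A's stateful loop (running indent, direction sentinel) by a stateless
-- per-row formula joined over the range: simpler decomposition, same cost.

-- ===== PORT A =====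
-- loop body of A's for-loop, extracted as a named helper (state: romb, spatiu, t)
def funcStep (size : Int) (st : List Char × Int × Int) (i : Int) : List Char × Int × Int :=
  let romb := st.1 ++ PySem.List.pyRepeat [' '] st.2.1 ++ ['@']
  let spatiu := max 0 (st.2.1 + st.2.2)
  if i < PySem.Int.floordiv size 2 then
    (romb ++ PySem.List.pyRepeat (PySem.List.pyRepeat ['.'] 2) i ++ ['@', '\n'], spatiu, st.2.2)
  else
    let spatiu := if spatiu = 0 then 1 else spatiu
    (romb ++ PySem.List.pyRepeat (PySem.List.pyRepeat ['.'] 2) (size - i - 1) ++ ['@', '\n'], spatiu, 1)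

def func (size : Int) : String :=
  let size := size + (1 - PySem.Int.mod size 2)
  String.mk (((PySem.List.pyRange 0 size 1).foldl (funcStep size)
    ([], PySem.Int.floordiv size 2, -1)).1)

-- ===== PORT B =====
-- one row of the rhombus, computed directly from its index
def funcRow (size half i : Int) : List Char :=
  PySem.List.pyRepeat [' '] |half - i| ++ ['@']
    ++ PySem.List.pyRepeat ['.'] (2 * min i (size - 1 - i)) ++ ['@', '\n']

def func_alt (size : Int) : String :=
  let size := size + (1 - PySem.Int.mod size 2)
  let half := PySem.Int.floordiv size 2
  String.mk (((PySem.List.pyRange 0 size 1).map (funcRow size half)).flatten)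

-- ===== PRECONDITION & SPEC =====
def Spec_func (size : Int) (out : String) : Prop := out = func_alt size
instance (size : Int) (out : String) : Decidable (Spec_func size out) := by unfold Spec_func; infer_instance

-- ===== CLAIM (what is proved, stated in full; the proofs are below) =====
def Claim_equal_func : Prop := ∀ (size : Int), Dom_func size → Spec_func size (func size)

-- ===== LEMMAS AND PROOFS =====

lemma flatten_replicate_single (n : Nat) :
    (List.replicate n ['.']).flatten = List.replicate n '.' := by
  induction n with
  | zero => simp
  | succ k ih => simp [List.replicate_succ, ih]

lemma flatten_replicate_pair (n : Nat) :
    (List.replicate n ['.', '.']).flatten = List.replicate (2 * n) '.' := by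
  induction n with
  | zero => simp
  | succ k ih => simp [List.replicate_succ, ih, Nat.mul_succ]

lemma pyRepeat_two (i : Int) :
    PySem.List.pyRepeat (PySem.List.pyRepeat ['.'] 2) i = PySem.List.pyRepeat ['.'] (2 * i) := by
  simp only [PySem.List.pyRepeat]
  rw [show ((2:Int)).toNat = 2 from rfl,
    show (List.replicate 2 ['.']).flatten = ['.', '.'] from rfl, flatten_replicate_pair,
    show (2 * i).toNat = 2 * i.toNat by omega, flatten_replicate_single]

lemma floordiv_two (h : Int) : PySem.Int.floordiv (2 * h + 1) 2 = h := by
  simp only [PySem.Int.floordiv, Int.fdiv_eq_ediv]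
  omega

-- one step of A's loop, from the invariant state, appends B's row and restores the invariant
lemma step_eq (h i : Int) (hh : 0 ≤ h) (h0 : 0 ≤ i) (hin : i < 2 * h + 1) (acc : List Char) :
    funcStep (2 * h + 1) (acc, |h - i|, if i ≤ h then -1 else 1) i
      = (acc ++ funcRow (2 * h + 1) h i, |h - (i + 1)|, if i + 1 ≤ h then -1 else 1) := by
  simp only [funcStep, funcRow, floordiv_two, pyRepeat_two]
  rcases lt_trichotomy i h with hc | hc | hc
  · rw [abs_of_nonneg (by omega : (0:Int) ≤ h - i), abs_of_nonneg (by omega : (0:Int) ≤ h - (i+1)),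
      if_pos hc, if_pos (by omega : i ≤ h), if_pos (by omega : i + 1 ≤ h),
      show min i (2 * h + 1 - 1 - i) = i by omega]
    simp only [Prod.mk.injEq, List.append_assoc]
    exact ⟨trivial, by omega, trivial⟩
  · subst hc
    rw [abs_of_nonneg (by omega : (0:Int) ≤ i - i), abs_of_nonpos (by omega : i - (i+1) ≤ 0),
      if_neg (by omega : ¬ i < i), if_pos (le_refl i), if_pos (by omega : max 0 (i - i + -1) = 0),
      if_neg (by omega : ¬ i + 1 ≤ i),
      show min i (2 * i + 1 - 1 - i) = 2 * i + 1 - i - 1 by omega]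
    simp only [Prod.mk.injEq, List.append_assoc]
    exact ⟨trivial, by omega, trivial⟩
  · rw [abs_of_nonpos (by omega : h - i ≤ 0), abs_of_nonpos (by omega : h - (i+1) ≤ 0),
      if_neg (by omega : ¬ i < h), if_neg (by omega : ¬ i ≤ h),
      if_neg (by omega : ¬ max 0 (-(h - i) + 1) = 0), if_neg (by omega : ¬ i + 1 ≤ h),
      show min i (2 * h + 1 - 1 - i) = 2 * h + 1 - i - 1 by omega]
    simp only [Prod.mk.injEq, List.append_assoc]
    exact ⟨trivial, by omega, trivial⟩

lemma loop_inv (h : Int) (hh : 0 ≤ h) :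
    ∀ (k : Nat) (i : Int) (acc : List Char), i = 2 * h + 1 - k → 0 ≤ i →
    ((PySem.List.pyRange i (2 * h + 1) 1).foldl (funcStep (2 * h + 1))
        (acc, |h - i|, if i ≤ h then -1 else 1)).1
      = acc ++ ((PySem.List.pyRange i (2 * h + 1) 1).map (funcRow (2 * h + 1) h)).flatten := by
  intro k
  induction k with
  | zero =>
      intro i acc hi _
      rw [PySem.List.pyRange_one_eq_nil (by omega)]
      simp
  | succ k ih =>
      intro i acc hi h0
      by_cases hlt : i < 2 * h + 1
      · rw [PySem.List.pyRange_one_cons hlt]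
        simp only [List.foldl_cons, List.map_cons, List.flatten_cons]
        rw [step_eq h i hh h0 hlt acc, ih (i + 1) (acc ++ funcRow (2 * h + 1) h i) (by omega) (by omega)]
        simp
      · rw [PySem.List.pyRange_one_eq_nil (by omega)]
        simp

-- ===== VERDICT (by name: the statement is the Claim_ definition above) =====
theorem func_spec : Claim_equal_func := by
  intro size _
  unfold Spec_func func func_alt
  have hpar : (size + (1 - PySem.Int.mod size 2)) % 2 = 1 := by
    rw [show PySem.Int.mod size 2 = size % 2 by simp [PySem.Int.mod, Int.fmod_eq_emod]]
    omega
  simp only []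
  revert hpar
  generalize size + (1 - PySem.Int.mod size 2) = m
  intro hpar
  by_cases hpos : 0 < m
  · obtain ⟨h, hm, hh⟩ : ∃ h, m = 2 * h + 1 ∧ 0 ≤ h := ⟨m / 2, by omega, by omega⟩
    subst hm
    rw [floordiv_two]
    have hinv := loop_inv h hh (2 * h + 1).toNat 0 [] (by omega) (by omega)
    rw [show |h - 0| = h by rw [show h - 0 = h by ring]; exact abs_of_nonneg hh,
      if_pos hh] at hinv
    rw [hinv]
    simp
  · rw [PySem.List.pyRange_one_eq_nil (by omega)]
    simp
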